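-- pv_equiv track=rewrite | github.com/harvard-edge/cs249r_book | book/tools/scripts/content/check_prose_spelling.py | extract_yaml_frontmatter
-- ===== SOURCE A (Python) =====
-- from typing import List, Tuple, Set
--
-- def extract_yaml_frontmatter(content: str) -> Tuple[int, int]:
--     """
--     Find the start and end positions of YAML frontmatter.
--
--     Returns:
--         Tuple of (start_pos, end_pos) or (0, 0) if no frontmatter
--     """
--     if not content.startswith('---'):
--         return (0, 0)
--
--     # Find the closing ---
--     lines = content.split('\n')
--     for i, line in enumerate(lines[1:], 1):
--         if line.strip() == '---':
--             # Return character positions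
--             start = 0
--             end = sum(len(lines[j]) + 1 for j in range(i + 1))
--             return (start, end)
--
--     return (0, 0)
-- ===== SOURCE B (Python) =====
-- def extract_yaml_frontmatter(content: str):
--     """Consume the raw string by repeated str.partition('\n') with a running
--     offset -- no line list, no enumerate, no per-hit summation."""
--     if not content.startswith('---'):
--         return (0, 0)
--     head, sep, rest = content.partition('\n')
--     if not sep:
--         return (0, 0)
--     offset = len(head) + 1
--     while True:
--         first, sep, rest = rest.partition('\n')
--         offset += len(first) + 1
--         if first.strip() == '---':
--             return (0, offset)
--         if not sep:
--             return (0, 0)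
-- ===== Notes on version B (the rewrite author's own statement) =====
-- stated objective: alternative
-- what changed: B consumes the raw string by repeated str.partition at the newline separator with a running offset, instead of A's split into a line list, enumerate over the tail lines and a per-hit summation over the line prefix.
import Mathlib
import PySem

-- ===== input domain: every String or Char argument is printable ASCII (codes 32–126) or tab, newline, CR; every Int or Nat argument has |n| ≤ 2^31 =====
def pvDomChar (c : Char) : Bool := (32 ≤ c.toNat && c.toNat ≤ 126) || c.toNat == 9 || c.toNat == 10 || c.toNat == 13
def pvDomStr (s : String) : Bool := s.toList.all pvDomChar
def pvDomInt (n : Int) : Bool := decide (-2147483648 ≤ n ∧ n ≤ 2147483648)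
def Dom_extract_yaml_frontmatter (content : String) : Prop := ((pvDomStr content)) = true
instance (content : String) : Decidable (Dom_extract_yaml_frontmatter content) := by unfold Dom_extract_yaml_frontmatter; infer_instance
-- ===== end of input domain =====

-- B consumes the raw string by repeated partition at '\n' with a running offset instead of building a line list with enumerate and a per-hit summation (alternative decomposition).


-- ===== PORT A =====
-- end = sum(len(lines[j]) + 1 for j in range(i + 1))
def eyfSumA (lines : List String) (n : Int) : Int :=
  (PySem.List.pyRange 0 n 1).foldl
    (fun acc j => acc + (PySem.Str.len (PySem.List.pyGetD lines j "")) + 1) 0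

-- for i, line in enumerate(lines[1:], 1): if line.strip() == '---': return (0, end)
def eyfLoopA (lines : List String) : List (Int × String) → Int × Int
  | [] => (0, 0)
  | (i, line) :: ps =>
    if PySem.Str.strip line = "---" then (0, eyfSumA lines (i + 1))
    else eyfLoopA lines ps

def extract_yaml_frontmatter (content : String) : Int × Int :=
  if ¬ PySem.Str.startswith content "---" then (0, 0)
  else
    let lines := (PySem.Str.split? content "\n").getD []
    eyfLoopA lines (PySem.List.enumerate (PySem.List.slice lines (some 1) none) 1)

-- ===== PORT B =====
-- while True: first, sep, rest = rest.partition('\n'); offset += len(first)+1; …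
-- str.partition('\n') is ported by hand on the char list: first = takeWhile (≠ '\n'),
-- sep nonempty ↔ takeWhile did not consume everything, rest = drop (len first + 1). Exact.
def eyfScan (cs : List Char) (offset : Int) : Int × Int :=
  if PySem.Chars.strip (cs.takeWhile (fun c => c ≠ '\n')) = "---".toList then
    (0, offset + (cs.takeWhile (fun c => c ≠ '\n')).length + 1)
  else if h : (cs.takeWhile (fun c => c ≠ '\n')).length = cs.length then (0, 0)
  else
    eyfScan (cs.drop ((cs.takeWhile (fun c => c ≠ '\n')).length + 1))
      (offset + (cs.takeWhile (fun c => c ≠ '\n')).length + 1)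
termination_by cs.length
decreasing_by
  have hle : (List.takeWhile (fun c => decide (c ≠ '\n')) cs).length ≤ cs.length :=
    (List.takeWhile_sublist _).length_le
  simp only [List.length_drop]
  omega

def extract_yaml_frontmatter_alt (content : String) : Int × Int :=
  if ¬ PySem.Str.startswith content "---" then (0, 0)
  else
    let cs := content.toList
    let head := cs.takeWhile (fun c => c ≠ '\n')
    if head.length = cs.length then (0, 0)  -- not sep
    else eyfScan (cs.drop (head.length + 1)) (head.length + 1)

-- ===== PRECONDITION & SPEC =====
def Spec_extract_yaml_frontmatter (content : String) (out : Int × Int) : Prop := out = extract_yaml_frontmatter_alt content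
instance (content : String) (out : Int × Int) : Decidable (Spec_extract_yaml_frontmatter content out) := by unfold Spec_extract_yaml_frontmatter; infer_instance

-- ===== CLAIM (what is proved, stated in full; the proofs are below) =====
def Claim_equal_extract_yaml_frontmatter : Prop := ∀ (content : String), Dom_extract_yaml_frontmatter content → Spec_extract_yaml_frontmatter content (extract_yaml_frontmatter content)

-- ===== LEMMAS AND PROOFS =====

-- proof-only spec of splitting on '\n'
def eyfLines : List Char → List (List Char)
  | [] => [[]]
  | c :: rest =>
    if c = '\n' then [] :: eyfLines rest
    else match eyfLines rest with
      | [] => [[c]]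
      | p :: ps => (c :: p) :: ps

theorem eyfLines_ne_nil (cs : List Char) : eyfLines cs ≠ [] := by
  cases cs with
  | nil => simp [eyfLines]
  | cons c rest =>
    simp only [eyfLines]
    split_ifs
    · simp
    · cases h : eyfLines rest <;> simp

-- prepend x onto the first piece
def eyfPrep (x : List Char) : List (List Char) → List (List Char)
  | [] => [x]
  | p :: ps => (x ++ p) :: ps

theorem eyf_splitOn_go (cs : List Char) :
    ∀ (fuel : Nat), cs.length < fuel → ∀ (cur : List Char) (acc : List (List Char)),
      PySem.Chars.splitOn.go ['\n'] fuel cs cur acc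
        = acc.reverse ++ eyfPrep cur.reverse (eyfLines cs) := by
  induction cs with
  | nil =>
    intro fuel hf cur acc
    match fuel, hf with
    | fuel + 1, _ => simp [PySem.Chars.splitOn.go, eyfLines, eyfPrep]
  | cons c rest ih =>
    intro fuel hf cur acc
    match fuel, hf with
    | fuel + 1, hf =>
      by_cases hc : c = '\n'
      · subst hc
        have hpre : List.isPrefixOf ['\n'] ('\n' :: rest) = true := by
          simp [List.isPrefixOf]
        rw [PySem.Chars.splitOn.go]
        simp only [hpre, if_true]
        rw [show List.drop ['\n'].length ('\n' :: rest) = rest from rfl]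
        rw [ih fuel (by simpa using Nat.lt_of_succ_lt_succ hf) [] (cur.reverse :: acc)]
        have hne := eyfLines_ne_nil rest
        cases hL : eyfLines rest with
        | nil => exact absurd hL hne
        | cons p ps => simp [eyfLines, eyfPrep, hL]
      · have hpre : List.isPrefixOf ['\n'] (c :: rest) = false := by
          simp [List.isPrefixOf, hc]
          intro h; exact absurd h.symm hc
        rw [PySem.Chars.splitOn.go]
        simp only [hpre, Bool.false_eq_true, if_false]
        rw [ih fuel (by simpa using Nat.lt_of_succ_lt_succ hf) (c :: cur) acc]
        have hne := eyfLines_ne_nil rest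
        cases hL : eyfLines rest with
        | nil => exact absurd hL hne
        | cons p ps => simp [eyfLines, eyfPrep, hc, hL]

theorem eyf_splitOn_eq (cs : List Char) :
    PySem.Chars.splitOn cs ['\n'] = eyfLines cs := by
  unfold PySem.Chars.splitOn
  rw [eyf_splitOn_go cs (cs.length + 1) (Nat.lt_succ_self _) [] []]
  have hne := eyfLines_ne_nil cs
  cases hL : eyfLines cs with
  | nil => exact absurd hL hne
  | cons p ps => simp [eyfPrep]

theorem eyf_lines_eq (content : String) :
    (PySem.Str.split? content "\n").getD []
      = (eyfLines content.toList).map String.ofList := by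
  simp [PySem.Str.split?, PySem.Chars.split?, eyf_splitOn_eq]

theorem eyfLines_of_full (cs : List Char)
    (h : (cs.takeWhile (fun c => c ≠ '\n')).length = cs.length) :
    eyfLines cs = [cs] := by
  induction cs with
  | nil => simp [eyfLines]
  | cons c rest ih =>
    by_cases hc : c = '\n'
    · rw [List.takeWhile_cons_of_neg (by simp [hc])] at h
      simp at h
    · rw [List.takeWhile_cons_of_pos (by simp [hc])] at h
      simp only [List.length_cons, Nat.add_right_cancel_iff] at h
      simp [eyfLines, hc, ih h]

theorem eyfLines_of_split (cs : List Char)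
    (h : (cs.takeWhile (fun c => c ≠ '\n')).length ≠ cs.length) :
    eyfLines cs
      = cs.takeWhile (fun c => c ≠ '\n')
        :: eyfLines (cs.drop ((cs.takeWhile (fun c => c ≠ '\n')).length + 1)) := by
  induction cs with
  | nil => simp at h
  | cons c rest ih =>
    by_cases hc : c = '\n'
    · subst hc
      rw [List.takeWhile_cons_of_neg (by simp)]
      simp [eyfLines]
    · rw [List.takeWhile_cons_of_pos (by simp [hc])] at h ⊢
      simp only [List.length_cons, Nat.add_right_cancel_iff] at h
      have := ih (by omega)
      simp [eyfLines, hc, this]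

-- sums
-- sums
theorem eyfSumA_succ (lines : List String) (n : Nat) :
    eyfSumA lines ((n : Int) + 1)
      = eyfSumA lines n + PySem.Str.len (PySem.List.pyGetD lines (n : Int) "") + 1 := by
  unfold eyfSumA
  rw [PySem.List.pyRange_one_succ_right (by exact_mod_cast Int.natCast_nonneg n)]
  simp [List.foldl_append]

theorem eyfSumA_zero (lines : List String) : eyfSumA lines 0 = 0 := by
  simp [eyfSumA, PySem.List.pyRange_one_eq_nil]

theorem eyf_strip_iff (cs : List Char) :
    PySem.Str.strip (String.ofList cs) = "---"
      ↔ PySem.Chars.strip cs = "---".toList := by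
  constructor
  · intro h
    have := congrArg String.toList h
    simpa using this
  · intro h
    apply String.toList_injective
    simpa using h

theorem eyf_hit (L : List String) (i : Nat) (piece : List Char)
    (hget : L[i]? = some (String.ofList piece)) :
    eyfSumA L ((i : Int) + 1) = eyfSumA L i + piece.length + 1 := by
  have hline : PySem.List.pyGetD L (i : Int) "" = String.ofList piece := by
    simp [PySem.List.pyGetD_natCast, List.getD_eq_getElem?_getD, hget]
  have h := eyfSumA_succ L i
  rw [hline] at h
  simpa using h

theorem eyf_main : ∀ (n : Nat) (cs : List Char), cs.length ≤ n →
    ∀ (L : List String) (i : Nat), L.drop i = (eyfLines cs).map String.ofList →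
      eyfLoopA L (PySem.List.enumerate ((eyfLines cs).map String.ofList) (i : Int))
        = eyfScan cs (eyfSumA L i) := by
  intro n
  induction n with
  | zero =>
    intro cs hn L i hdrop
    have hcs : cs = [] := List.length_eq_zero_iff.mp (Nat.le_zero.mp hn)
    subst hcs
    have hget : L[i]? = some (String.ofList []) := by
      have h : (List.drop i L)[0]? = L[i + 0]? := List.getElem?_drop
      rw [hdrop] at h
      simpa [eyfLines] using h.symm
    rw [eyfScan]
    simp only [List.takeWhile_nil, List.length_nil, List.drop_nil]
    simp only [eyfLines, List.map_cons, List.map_nil, PySem.List.enumerate_cons,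
      PySem.List.enumerate_nil, eyfLoopA]
    by_cases hs : PySem.Chars.strip ([] : List Char) = "---".toList
    · rw [if_pos ((eyf_strip_iff []).mpr hs), if_pos hs, eyf_hit L i [] hget]
      simp
    · rw [if_neg (fun hh => hs ((eyf_strip_iff []).mp hh)), if_neg hs]
      simp [eyfLoopA]
  | succ n ih =>
    intro cs hn L i hdrop
    by_cases hfull : (cs.takeWhile (fun c => c ≠ '\n')).length = cs.length
    · -- no newline left: single final line cs itself
      have htw : cs.takeWhile (fun c => c ≠ '\n') = cs :=
        (List.takeWhile_prefix _).eq_of_length hfull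
      have hget : L[i]? = some (String.ofList cs) := by
        have h : (List.drop i L)[0]? = L[i + 0]? := List.getElem?_drop
        rw [hdrop] at h
        simpa [eyfLines_of_full cs hfull] using h.symm
      rw [eyfScan, eyfLines_of_full cs hfull]
      simp only [htw, List.map_cons, List.map_nil, PySem.List.enumerate_cons,
        PySem.List.enumerate_nil, eyfLoopA]
      by_cases hs : PySem.Chars.strip cs = "---".toList
      · rw [if_pos ((eyf_strip_iff cs).mpr hs), if_pos hs, eyf_hit L i cs hget]
      · rw [if_neg (fun hh => hs ((eyf_strip_iff cs).mp hh)), if_neg hs]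
        simp [eyfLoopA]
    · -- a newline splits off the first piece tw
      have hsplit := eyfLines_of_split cs hfull
      have hget : L[i]? = some (String.ofList (cs.takeWhile (fun c => c ≠ '\n'))) := by
        have h : (List.drop i L)[0]? = L[i + 0]? := List.getElem?_drop
        rw [hdrop] at h
        simpa [hsplit] using h.symm
      have hdrop' : L.drop (i + 1)
          = (eyfLines (cs.drop ((cs.takeWhile (fun c => c ≠ '\n')).length + 1))).map String.ofList := by
        have h := congrArg (List.drop 1) hdrop
        rw [List.drop_drop, hsplit] at h
        simpa [Nat.add_comm] using h
      have hlen : (cs.drop ((cs.takeWhile (fun c => c ≠ '\n')).length + 1)).length ≤ n := by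
        have hle : (List.takeWhile (fun c => decide (c ≠ '\n')) cs).length ≤ cs.length :=
          (List.takeWhile_sublist _).length_le
        simp only [List.length_drop]
        omega
      rw [eyfScan, hsplit]
      simp only [List.map_cons, PySem.List.enumerate_cons, eyfLoopA]
      by_cases hs : PySem.Chars.strip (cs.takeWhile (fun c => c ≠ '\n')) = "---".toList
      · rw [if_pos ((eyf_strip_iff _).mpr hs), if_pos hs, eyf_hit L i _ hget]
      · rw [if_neg (fun hh => hs ((eyf_strip_iff _).mp hh)), if_neg hs, dif_neg hfull]
        have hrec := ih (cs.drop ((cs.takeWhile (fun c => c ≠ '\n')).length + 1)) hlen L (i + 1) hdrop'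
        push_cast at hrec
        rw [hrec, eyf_hit L i _ hget]

-- ===== VERDICT (by name: the statement is the Claim_ definition above) =====
theorem extract_yaml_frontmatter_spec : Claim_equal_extract_yaml_frontmatter := by
  intro content _
  unfold Spec_extract_yaml_frontmatter extract_yaml_frontmatter extract_yaml_frontmatter_alt
  by_cases hsw : PySem.Str.startswith content "---" = true
  · rw [if_neg (not_not_intro hsw), if_neg (not_not_intro hsw)]
    rw [eyf_lines_eq content]
    by_cases hfull : (content.toList.takeWhile (fun c => c ≠ '\n')).length = content.toList.length
    · rw [if_pos hfull, eyfLines_of_full _ hfull]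
      simp [PySem.List.slice_from, eyfLoopA, PySem.List.enumerate_nil]
    · rw [if_neg hfull, eyfLines_of_split _ hfull]
      simp only [List.map_cons]
      rw [show PySem.List.slice (String.ofList (content.toList.takeWhile (fun c => c ≠ '\n'))
            :: (eyfLines (content.toList.drop ((content.toList.takeWhile (fun c => c ≠ '\n')).length + 1))).map String.ofList)
            (some 1) none
          = (eyfLines (content.toList.drop ((content.toList.takeWhile (fun c => c ≠ '\n')).length + 1))).map String.ofList
          from by simp [PySem.List.slice_from]]
      have hdrop : (String.ofList (content.toList.takeWhile (fun c => c ≠ '\n'))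
            :: (eyfLines (content.toList.drop ((content.toList.takeWhile (fun c => c ≠ '\n')).length + 1))).map String.ofList).drop 1
          = (eyfLines (content.toList.drop ((content.toList.takeWhile (fun c => c ≠ '\n')).length + 1))).map String.ofList := by
        simp
      have h := eyf_main _ _ (le_refl _) _ 1 hdrop
      push_cast at h
      rw [h]
      congr 1
      have h0 := eyfSumA_succ (String.ofList (content.toList.takeWhile (fun c => c ≠ '\n'))
            :: (eyfLines (content.toList.drop ((content.toList.takeWhile (fun c => c ≠ '\n')).length + 1))).map String.ofList) 0
      simp only [Nat.cast_zero, eyfSumA_zero, zero_add] at h0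
      rw [h0]
      simp [PySem.List.pyGetD]
  · rw [if_pos hsw, if_pos hsw]
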